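-- pv_equiv track=rewrite | github.com/Mercerbearman/aoc2018 | Day2.py | Parse
-- ===== SOURCE A (Python) =====
-- def getCharCounts(line):
--     hasAtLeast2 = 0
--     hasAtLeast3 = 0
--     charCount = {}
--
--     for item in line.strip():
--         if item in charCount:
--             charCount[item] = charCount[item] + 1
--         else:
--             charCount[item] = 1
--
--
--     """Now lets get the times 2 is in the list and 3 or more"""
--     for _,v in charCount.items():
--         if v >= 3:
--             hasAtLeast3 = 1
--         if v == 2:
--             hasAtLeast2 = 1
--         if hasAtLeast3 and hasAtLeast2:
--             return (hasAtLeast2, hasAtLeast3)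
--
--     return (hasAtLeast2, hasAtLeast3)
--
-- def Parse(text):
--     occurrences = {}
--     occurrences[2] = 0
--     occurrences[3] = 0
--     for line in text:
--         (two, three) = getCharCounts(line)
--         occurrences[2] = occurrences[2] + two
--         occurrences[3] = occurrences[3] + three
--     return occurrences
-- ===== SOURCE B (Python) =====
-- def Parse(text):
--     count2 = 0
--     count3 = 0
--     for line in text:
--         s = sorted(line.strip())
--         runs = []
--         i = 0
--         n = len(s)
--         while i < n:
--             j = i + 1
--             while j < n and s[j] == s[i]:
--                 j += 1
--             runs.append(j - i)
--             i = j
--         if 2 in runs: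
--             count2 += 1
--         if any(r >= 3 for r in runs):
--             count3 += 1
--     return {2: count2, 3: count3}
-- ===== Notes on version B (the rewrite author's own statement) =====
-- stated objective: alternative
-- what changed: Per line, the dict-based character-frequency count plus early-exit scan over dict values is replaced by sorting the stripped line and computing run lengths of equal adjacent characters, then testing 2-in-runs and any-run>=3.
import Mathlib
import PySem

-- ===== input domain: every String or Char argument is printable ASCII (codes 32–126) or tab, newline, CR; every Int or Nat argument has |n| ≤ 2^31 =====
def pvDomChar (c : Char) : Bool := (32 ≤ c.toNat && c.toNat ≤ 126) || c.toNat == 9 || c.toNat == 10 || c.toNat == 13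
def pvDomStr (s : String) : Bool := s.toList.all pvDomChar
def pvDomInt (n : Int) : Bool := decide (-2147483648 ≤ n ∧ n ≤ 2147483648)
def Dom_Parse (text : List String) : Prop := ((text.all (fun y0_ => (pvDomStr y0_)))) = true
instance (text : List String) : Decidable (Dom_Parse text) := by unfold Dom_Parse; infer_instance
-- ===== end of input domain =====

-- B replaces A's per-line dict frequency count by sort-then-run-lengths; alternative algorithm, same results.

-- ===== PORT A =====
-- the value-scanning loop of getCharCounts, with its early return
def ccLoop : List (Char × Int) → Int → Int → Int × Int
  | [], h2, h3 => (h2, h3)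
  | (_, v) :: rest, h2, h3 =>
    let h3' := if 3 ≤ v then 1 else h3
    let h2' := if v == 2 then (1 : Int) else h2
    if h3' ≠ 0 ∧ h2' ≠ 0 then (h2', h3') else ccLoop rest h2' h3'

def getCharCounts (line : String) : Int × Int :=
  let charCount : PySem.Dict Char Int :=
    (PySem.Str.strip line).toList.foldl
      (fun d item => if d.contains item then d.insert item (d.getD item 0 + 1) else d.insert item 1)
      PySem.Dict.empty
  ccLoop charCount.items 0 0

def Parse (text : List String) : List (Int × Int) :=
  let occ : PySem.Dict Int Int := ((PySem.Dict.empty).insert 2 0).insert 3 0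
  let occ := text.foldl (fun occ line =>
    let tt := getCharCounts line
    let occ := occ.insert 2 (occ.getD 2 0 + tt.1)
    occ.insert 3 (occ.getD 3 0 + tt.2)) occ
  occ.items

-- ===== PORT B =====
-- run lengths of equal adjacent elements (the two nested while loops of Source B)
def runsOf : List Char → List Int
  | [] => []
  | c :: xs =>
    (((xs.takeWhile (· == c)).length : Int) + 1) :: runsOf (xs.dropWhile (· == c))
termination_by l => l.length
decreasing_by
  simp only [List.length_cons]
  exact Nat.lt_succ_of_le (List.length_dropWhile_le _ _)

def Parse_alt (text : List String) : List (Int × Int) :=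
  let res := text.foldl (fun (p : Int × Int) line =>
    let s := PySem.List.sorted (PySem.Str.strip line).toList (fun x => x) false
    let rs := runsOf s
    let p := if (2 : Int) ∈ rs then (p.1 + 1, p.2) else p
    if rs.any (fun r => decide (3 ≤ r)) then (p.1, p.2 + 1) else p) (0, 0)
  [(2, res.1), (3, res.2)]

-- ===== PRECONDITION & SPEC =====
def Spec_Parse (text : List String) (out : List (Int × Int)) : Prop := out = Parse_alt text
instance (text : List String) (out : List (Int × Int)) : Decidable (Spec_Parse text out) := by unfold Spec_Parse; infer_instance

-- ===== CLAIM (what is proved, stated in full; the proofs are below) =====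
def Claim_equal_Parse : Prop := ∀ (text : List String), Dom_Parse text → Spec_Parse text (Parse text)

-- ===== LEMMAS AND PROOFS =====

theorem ccLoop_eq (l : List (Char × Int)) (h2 h3 : Int)
    (hh2 : h2 = 0 ∨ h2 = 1) (hh3 : h3 = 0 ∨ h3 = 1) :
    ccLoop l h2 h3 =
      ((if h2 = 1 ∨ ∃ p ∈ l, p.2 = 2 then (1 : Int) else 0),
       (if h3 = 1 ∨ ∃ p ∈ l, 3 ≤ p.2 then (1 : Int) else 0)) := by
  induction l generalizing h2 h3 with
  | nil =>
    simp only [ccLoop, List.not_mem_nil, false_and, exists_false, or_false]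
    rcases hh2 with rfl | rfl <;> rcases hh3 with rfl | rfl <;> norm_num
  | cons q rest ih =>
    obtain ⟨k, v⟩ := q
    simp only [ccLoop]
    by_cases hv2 : v = 2 <;> by_cases hv3 : (3:Int) ≤ v
    · omega
    · -- v = 2, ¬ 3 ≤ v
      subst hv2
      simp only [hv3, BEq.rfl, if_true, if_false, reduceIte]
      rcases hh2 with rfl | rfl <;> rcases hh3 with rfl | rfl <;>
        simp only [ne_eq, one_ne_zero, not_false_eq_true, and_self, and_true, and_false,
          not_true_eq_false, false_and, true_and, if_pos, if_neg, reduceIte,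
          zero_ne_one, not_false_iff] <;>
        first
        | (rw [ih 1 0 (Or.inr rfl) (Or.inl rfl)];
           simp only [List.exists_mem_cons_iff, hv3, false_or, true_or, or_false, or_true, zero_ne_one, one_ne_zero, eq_self_iff_true, if_true, if_false, reduceIte])
        | simp only [List.exists_mem_cons_iff, hv3, false_or, true_or, or_false, or_true, zero_ne_one, one_ne_zero, eq_self_iff_true, if_true, if_false, reduceIte]
    · -- v ≠ 2, 3 ≤ v
      have hb : (v == (2 : Int)) = false := by simpa using hv2
      simp only [hv3, hb, Bool.false_eq_true, if_true, if_false, reduceIte]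
      rcases hh2 with rfl | rfl <;> rcases hh3 with rfl | rfl <;>
        simp only [ne_eq, one_ne_zero, zero_ne_one, not_false_eq_true, and_self, true_and,
          false_and, and_true, and_false, not_true_eq_false, if_pos, if_neg, reduceIte] <;>
        first
        | (rw [ih 0 1 (Or.inl rfl) (Or.inr rfl)];
           simp only [List.exists_mem_cons_iff, hv2, hv3, false_or, true_or, or_false, or_true, zero_ne_one, one_ne_zero, eq_self_iff_true, if_true, if_false, reduceIte])
        | simp only [List.exists_mem_cons_iff, hv2, hv3, false_or, true_or, or_false, or_true, zero_ne_one, one_ne_zero, eq_self_iff_true, if_true, if_false, reduceIte]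
    · -- v ≠ 2, ¬ 3 ≤ v
      have hb : (v == (2 : Int)) = false := by simpa using hv2
      simp only [hv3, hb, Bool.false_eq_true, if_false, reduceIte]
      rcases hh2 with rfl | rfl <;> rcases hh3 with rfl | rfl <;>
        simp only [ne_eq, one_ne_zero, zero_ne_one, not_false_eq_true, and_self, true_and,
          false_and, and_true, and_false, not_true_eq_false, if_pos, if_neg, reduceIte] <;>
        first
        | (rw [ih 0 0 (Or.inl rfl) (Or.inl rfl)];
           simp only [List.exists_mem_cons_iff, hv2, hv3, false_or, true_or, or_false, or_true, zero_ne_one, one_ne_zero, eq_self_iff_true, if_true, if_false, reduceIte])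
        | (rw [ih 0 1 (Or.inl rfl) (Or.inr rfl)];
           simp only [List.exists_mem_cons_iff, hv2, hv3, false_or, true_or, or_false, or_true, zero_ne_one, one_ne_zero, eq_self_iff_true, if_true, if_false, reduceIte])
        | (rw [ih 1 0 (Or.inr rfl) (Or.inl rfl)];
           simp only [List.exists_mem_cons_iff, hv2, hv3, false_or, true_or, or_false, or_true, zero_ne_one, one_ne_zero, eq_self_iff_true, if_true, if_false, reduceIte])
        | simp only [List.exists_mem_cons_iff, hv2, hv3, false_or, true_or, or_false, or_true, zero_ne_one, one_ne_zero, eq_self_iff_true, if_true, if_false, reduceIte]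

-- A's counting loop builds exactly the counter dict
theorem foldA_eq_counter (s : List Char) :
    s.foldl (fun d item => if d.contains item then d.insert item (d.getD item 0 + 1) else d.insert item 1)
      PySem.Dict.empty = PySem.Dict.counter s := by
  rw [← PySem.Dict.foldl_insert_getD_add_one_eq_counter]
  apply PySem.List.foldl_congr_mem
  intro d item _
  by_cases h : d.contains item = true
  · rw [if_pos h]
  · rw [if_neg h, PySem.Dict.getD_of_not_contains d 0 (by simpa using h)]
    norm_num

theorem mem_runsOf_sorted (t : List Char) (hs : t.Sorted (· ≤ ·)) (n : Int) :
    n ∈ runsOf t ↔ ∃ c ∈ t, (t.count c : Int) = n := by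
  induction t using runsOf.induct with
  | case1 => simp [runsOf]
  | case2 c xs ih =>
    have hxs : xs.Sorted (· ≤ ·) := hs.of_cons
    have hdr : (xs.dropWhile (· == c)).Sorted (· ≤ ·) :=
      hxs.sublist (List.dropWhile_sublist _)
    have hcle : ∀ y ∈ xs, c ≤ y := fun y hy => (List.sorted_cons.mp hs).1 y hy
    have hdrop_ne : ∀ y ∈ xs.dropWhile (· == c), y ≠ c := by
      intro y hy
      cases hd : xs.dropWhile (· == c) with
      | nil => simp [hd] at hy
      | cons h tl =>
        have hne0 : xs.dropWhile (· == c) ≠ [] := by simp [hd]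
        have hhne : ((· == c) ((xs.dropWhile (· == c)).head hne0)) = false :=
          List.head_dropWhile_not (· == c) hne0
        have hhne' : h ≠ c := by
          have hhead : (xs.dropWhile (· == c)).head hne0 = h := by
            rw [List.head_eq_iff_head?_eq_some, hd]; rfl
          rw [hhead] at hhne
          simpa using hhne
        have hhx : h ∈ xs := (List.dropWhile_sublist _).subset (by rw [hd]; exact List.mem_cons_self)
        have hch : c < h := lt_of_le_of_ne (hcle h hhx) (Ne.symm hhne')
        rw [hd] at hy
        rcases List.mem_cons.mp hy with rfl | hytl
        · exact hhne'
        · have hhy : h ≤ y := by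
            rw [hd] at hdr
            exact (List.sorted_cons.mp hdr).1 y hytl
          exact fun hyc => absurd (hyc ▸ hhy) (not_le.mpr hch)
    have htake : ∀ y ∈ xs.takeWhile (· == c), y = c := by
      intro y hy
      simpa using List.mem_takeWhile_imp hy
    have hxs_count : ∀ c' : Char, xs.count c'
        = (xs.takeWhile (· == c)).count c' + (xs.dropWhile (· == c)).count c' := by
      intro c'
      conv_lhs => rw [← List.takeWhile_append_dropWhile (p := (· == c)) (l := xs)]
      rw [List.count_append]
    have hcount_c : (c :: xs).count c = (xs.takeWhile (· == c)).length + 1 := by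
      rw [List.count_cons_self, hxs_count c]
      have h1 : (xs.takeWhile (· == c)).count c = (xs.takeWhile (· == c)).length :=
        List.count_eq_length.mpr (fun y hy => (htake y hy).symm)
      have h2 : (xs.dropWhile (· == c)).count c = 0 :=
        List.count_eq_zero.mpr (fun hmem => (hdrop_ne c hmem) rfl)
      omega
    have hcount_ne : ∀ c', c' ≠ c → (c :: xs).count c' = (xs.dropWhile (· == c)).count c' := by
      intro c' hne
      rw [List.count_cons_of_ne (Ne.symm hne), hxs_count c']
      have : (xs.takeWhile (· == c)).count c' = 0 :=
        List.count_eq_zero.mpr (fun hmem => hne (htake c' hmem))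
      omega
    rw [runsOf]
    simp only [List.mem_cons, ih hdr]
    constructor
    · rintro (rfl | ⟨c', hc', hcnt⟩)
      · exact ⟨c, by simp, by rw [hcount_c]; push_cast; ring⟩
      · refine ⟨c', Or.inr ((List.dropWhile_sublist _).subset hc'), ?_⟩
        rw [hcount_ne c' (hdrop_ne c' hc')]
        exact hcnt
    · rintro ⟨c', hc', hcnt⟩
      by_cases hcc : c' = c
      · subst hcc
        left
        rw [hcount_c] at hcnt
        push_cast at hcnt
        omega
      · rcases hc' with rfl | hc'
        · exact absurd rfl hcc
        · right
          conv at hc' => rw [← List.takeWhile_append_dropWhile (p := (· == c)) (l := xs)]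
          rw [List.mem_append] at hc'
          rcases hc' with h | h
          · exact absurd (htake c' h) hcc
          · exact ⟨c', h, by rw [← hcount_ne c' hcc]; exact hcnt⟩

-- the per-line equivalence: A's getCharCounts = B's flags from run lengths
theorem perLine (line : String) :
    getCharCounts line =
      ((if (2 : Int) ∈ runsOf (PySem.List.sorted (PySem.Str.strip line).toList (fun x => x) false)
          then (1 : Int) else 0),
       (if (runsOf (PySem.List.sorted (PySem.Str.strip line).toList (fun x => x) false)).any
            (fun r => decide (3 ≤ r)) = true then (1 : Int) else 0)) := by
  set s0 : List Char := (PySem.Str.strip line).toList with hs0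
  set t : List Char := PySem.List.sorted s0 (fun x => x) false with ht
  have hperm : t.Perm s0 := PySem.List.sorted_perm s0 (fun x => x) false
  have hsorted : t.Sorted (· ≤ ·) := by
    have := PySem.List.sorted_pairwise s0 (fun x => x)
    simpa [List.Sorted, ht] using this
  have hE2 : ((2 : Int) ∈ runsOf t) ↔ (∃ c ∈ s0, (s0.count c : Int) = 2) := by
    rw [mem_runsOf_sorted t hsorted]
    constructor
    · rintro ⟨c, hc, hcnt⟩
      exact ⟨c, hperm.mem_iff.mp hc, by rw [← hperm.count_eq]; exact hcnt⟩
    · rintro ⟨c, hc, hcnt⟩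
      exact ⟨c, hperm.mem_iff.mpr hc, by rw [hperm.count_eq]; exact hcnt⟩
  have hE3 : ((runsOf t).any (fun r => decide (3 ≤ r)) = true) ↔ (∃ c ∈ s0, 3 ≤ (s0.count c : Int)) := by
    rw [List.any_eq_true]
    constructor
    · rintro ⟨r, hr, h3⟩
      obtain ⟨c, hc, hcnt⟩ := (mem_runsOf_sorted t hsorted r).mp hr
      refine ⟨c, hperm.mem_iff.mp hc, ?_⟩
      rw [← hperm.count_eq, hcnt]
      simpa using h3
    · rintro ⟨c, hc, hcnt⟩
      refine ⟨(t.count c : Int), (mem_runsOf_sorted t hsorted _).mpr ⟨c, hperm.mem_iff.mpr hc, rfl⟩, ?_⟩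
      simp only [decide_eq_true_eq, hperm.count_eq]
      exact hcnt
  have hccl : getCharCounts line = ccLoop (PySem.Dict.counter s0).items 0 0 := by
    unfold getCharCounts
    rw [foldA_eq_counter s0]
  rw [hccl, ccLoop_eq _ 0 0 (Or.inl rfl) (Or.inl rfl)]
  have hA2 : (∃ p ∈ (PySem.Dict.counter s0).items, p.2 = 2) ↔ ∃ c ∈ s0, (s0.count c : Int) = 2 := by
    rw [PySem.Dict.items_counter s0]
    constructor
    · rintro ⟨p, hp, hpv⟩
      obtain ⟨c, hc, rfl⟩ := List.mem_map.mp hp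
      exact ⟨c, (PySem.Set.mem_ofList _ _).mp hc, hpv⟩
    · rintro ⟨c, hc, hcnt⟩
      exact ⟨(c, (s0.count c : Int)), List.mem_map.mpr ⟨c, (PySem.Set.mem_ofList _ _).mpr hc, rfl⟩, hcnt⟩
  have hA3 : (∃ p ∈ (PySem.Dict.counter s0).items, 3 ≤ p.2) ↔ ∃ c ∈ s0, 3 ≤ (s0.count c : Int) := by
    rw [PySem.Dict.items_counter s0]
    constructor
    · rintro ⟨p, hp, hpv⟩
      obtain ⟨c, hc, rfl⟩ := List.mem_map.mp hp
      exact ⟨c, (PySem.Set.mem_ofList _ _).mp hc, hpv⟩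
    · rintro ⟨c, hc, hcnt⟩
      exact ⟨(c, (s0.count c : Int)), List.mem_map.mpr ⟨c, (PySem.Set.mem_ofList _ _).mpr hc, rfl⟩, hcnt⟩
  have e2 : ((0 : Int) = 1 ∨ ∃ p ∈ (PySem.Dict.counter s0).items, p.2 = 2) ↔ ((2 : Int) ∈ runsOf t) := by
    rw [hE2]
    simp [hA2]
  have e3 : ((0 : Int) = 1 ∨ ∃ p ∈ (PySem.Dict.counter s0).items, 3 ≤ p.2)
      ↔ ((runsOf t).any (fun r => decide (3 ≤ r)) = true) := by
    rw [hE3]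
    simp [hA3]
  rw [if_congr e2 rfl rfl, if_congr e3 rfl rfl]

-- proof-side names for the two loop bodies (defeq to the lambdas in the ports)
def stepA (occ : PySem.Dict Int Int) (line : String) : PySem.Dict Int Int :=
  let tt := getCharCounts line
  let occ := occ.insert 2 (occ.getD 2 0 + tt.1)
  occ.insert 3 (occ.getD 3 0 + tt.2)

def stepB (p : Int × Int) (line : String) : Int × Int :=
  let s := PySem.List.sorted (PySem.Str.strip line).toList (fun x => x) false
  let rs := runsOf s
  let p := if (2 : Int) ∈ rs then (p.1 + 1, p.2) else p
  if rs.any (fun r => decide (3 ≤ r)) then (p.1, p.2 + 1) else p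

theorem stepB_eq (a b : Int) (line : String) :
    stepB (a, b) line = (a + (getCharCounts line).1, b + (getCharCounts line).2) := by
  rw [perLine line]
  unfold stepB
  dsimp only
  split_ifs <;> simp

-- the occurrences dict over a prefix of lines is the literal two-key dict of the two running sums
theorem fold_items (text : List String) (a b : Int) :
    (text.foldl stepA (((PySem.Dict.empty : PySem.Dict Int Int).insert 2 a).insert 3 b)).items
    = [(2, (text.foldl stepB (a, b)).1), (3, (text.foldl stepB (a, b)).2)] := by
  induction text generalizing a b with
  | nil => rfl
  | cons line rest ih =>
    rw [List.foldl_cons, List.foldl_cons]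
    have hstep : stepA (((PySem.Dict.empty : PySem.Dict Int Int).insert 2 a).insert 3 b) line
        = ((PySem.Dict.empty : PySem.Dict Int Int).insert 2 (a + (getCharCounts line).1)).insert 3
            (b + (getCharCounts line).2) := by
      rfl
    rw [hstep, ih (a + (getCharCounts line).1) (b + (getCharCounts line).2), stepB_eq a b line]

-- ===== VERDICT (by name: the statement is the Claim_ definition above) =====
theorem Parse_spec : Claim_equal_Parse := by
  intro text _
  show Parse text = Parse_alt text
  exact fold_items text 0 0
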